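-- pv_equiv track=rewrite | github.com/yuchan27/test1234 | AppYOLO/src/pipeline_service.py | find_escape_path
-- ===== SOURCE A (Python) =====
-- from collections import deque
-- from typing import Any, Optional
--
-- def find_escape_path(start: str, dangers: dict[str, bool], adj: dict[str, list[str]], safe_targets: list[str]) -> Optional[list[str]]:
--     if not safe_targets:
--         return None
--
--     visited = set()
--     queue = deque([(start, [start])])
--
--     while queue:
--         curr, path = queue.popleft()
--         if curr in visited:
--             continue
--         visited.add(curr)
--
--         if curr in safe_targets:
--             return path
--
--         for neigh in adj.get(curr, []):
--             if neigh not in visited and not dangers.get(neigh, True):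
--                 queue.append((neigh, path + [neigh]))
--
--     return None
-- ===== SOURCE B (Python) =====
-- from typing import Optional
--
--
-- def find_escape_path(start: str, dangers: dict[str, bool], adj: dict[str, list[str]], safe_targets: list[str]) -> Optional[list[str]]:
--     if not safe_targets:
--         return None
--
--     safe = set(safe_targets)
--     parent: dict[str, Optional[str]] = {start: None}
--     frontier = [start]
--
--     while frontier:
--         nxt = []
--         for curr in frontier:
--             if curr in safe:
--                 path = []
--                 node: Optional[str] = curr
--                 while node is not None:
--                     path.append(node)
--                     node = parent[node]
--                 return path[::-1]
--             for neigh in adj.get(curr, []):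
--                 if neigh not in parent and not dangers.get(neigh, True):
--                     parent[neigh] = curr
--                     nxt.append(neigh)
--         frontier = nxt
--
--     return None
-- ===== Notes on version B (the rewrite author's own statement) =====
-- stated objective: alternative
-- what changed: B replaces A's FIFO-deque BFS with per-entry path copying (path + [neigh]) and a visited-check at pop by a level-synchronous BFS: frontier lists processed wave by wave, a parent dict recorded at first enqueue (which also serves as the seen-set, so duplicates are never enqueued and there is no skip branch), and a single backtracking reconstruction at the goal; safe_targets becomes a set.
import Mathlib
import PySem

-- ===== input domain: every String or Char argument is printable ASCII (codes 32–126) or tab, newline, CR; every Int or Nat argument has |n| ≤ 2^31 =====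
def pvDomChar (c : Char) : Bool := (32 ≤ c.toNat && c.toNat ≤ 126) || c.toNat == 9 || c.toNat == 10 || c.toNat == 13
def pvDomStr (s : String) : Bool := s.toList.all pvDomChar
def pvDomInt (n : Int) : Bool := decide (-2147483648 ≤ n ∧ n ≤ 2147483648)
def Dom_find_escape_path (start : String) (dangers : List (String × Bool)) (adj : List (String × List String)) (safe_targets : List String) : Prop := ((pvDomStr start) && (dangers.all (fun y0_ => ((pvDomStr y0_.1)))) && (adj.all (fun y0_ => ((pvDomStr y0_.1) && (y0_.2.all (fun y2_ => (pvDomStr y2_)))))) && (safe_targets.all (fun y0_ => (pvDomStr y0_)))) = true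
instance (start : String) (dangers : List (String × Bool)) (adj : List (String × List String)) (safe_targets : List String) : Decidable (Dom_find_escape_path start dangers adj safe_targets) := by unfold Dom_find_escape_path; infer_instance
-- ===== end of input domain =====

-- B replaces A's FIFO BFS with per-entry path copying and a visited-check at pop by a
-- level-synchronous BFS: frontier lists processed wave by wave, a parent dict recorded at
-- first enqueue (doubling as the seen-set, so nothing is enqueued twice), and one
-- backtracking reconstruction at the goal.

-- ===== PORT A =====
-- fuel bound 1 + total adjacency size: every iteration pops one queue entry, and at most
-- 1 + sum of adjacency-list lengths entries are ever enqueued (each node is expanded once).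
def pvFuel (adj : List (String × List String)) : Nat :=
  1 + (adj.map (fun kv => kv.2.length)).sum

def pvLoopA (dangers : PySem.Dict String Bool) (adj : PySem.Dict String (List String))
    (safe_targets : List String) :
    Nat → List (String × List String) → PySem.Set String → Option (List String)
  | 0, _, _ => none
  | _ + 1, [], _ => none
  | fuel + 1, (curr, path) :: rest, visited =>
    if PySem.Set.contains visited curr then
      pvLoopA dangers adj safe_targets fuel rest visited
    else
      let visited' := PySem.Set.add visited curr
      if safe_targets.contains curr then some path
      else
        pvLoopA dangers adj safe_targets fuel
          ((PySem.Dict.getD adj curr []).foldl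
            (fun q neigh =>
              if !PySem.Set.contains visited' neigh && !PySem.Dict.getD dangers neigh true then
                q ++ [(neigh, path ++ [neigh])]
              else q) rest)
          visited'

def find_escape_path (start : String) (dangers : List (String × Bool)) (adj : List (String × List String)) (safe_targets : List String) : Option (List String) :=
  if safe_targets.isEmpty then none
  else
    pvLoopA (PySem.Dict.ofList dangers) (PySem.Dict.ofList adj) safe_targets
      (pvFuel adj) [(start, [start])] PySem.Set.empty

-- ===== PORT B =====
-- outer-loop fuel bound: each round consumes a nonempty frontier of never-before-seen
-- nodes, so there are at most 1 + (1 + total adjacency size) rounds.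
def pvFuelB (adj : List (String × List String)) : Nat :=
  2 + (adj.map (fun kv => kv.2.length)).sum

-- 'path = []; while node is not None: path.append(node); node = parent[node]' — walks the
-- parent chain; chain nodes are distinct keys of parent, so fuel = parent.size is exact.
-- (A missing key would be Python's KeyError; unreachable: every chain node is a key.)
def pvWalk (parent : PySem.Dict String (Option String)) :
    Nat → Option String → List String → List String
  | _, none, path => path
  | 0, some _, path => path
  | fuel + 1, some node, path => pvWalk parent fuel ((parent.get? node).join) (path ++ [node])

-- one wave: 'for curr in frontier', returning the reconstructed path or (nxt, parent)
def pvLevel (dangers : PySem.Dict String Bool) (adj : PySem.Dict String (List String))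
    (safe : PySem.Set String) :
    List String → List String → PySem.Dict String (Option String) →
      (List String) ⊕ (List String × PySem.Dict String (Option String))
  | [], nxt, parent => Sum.inr (nxt, parent)
  | curr :: front, nxt, parent =>
    if PySem.Set.contains safe curr then
      Sum.inl ((pvWalk parent (PySem.Dict.size parent) (some curr) []).reverse)
    else
      let st := (PySem.Dict.getD adj curr []).foldl
        (fun (st : List String × PySem.Dict String (Option String)) neigh =>
          if !PySem.Dict.contains st.2 neigh && !PySem.Dict.getD dangers neigh true then
            (st.1 ++ [neigh], PySem.Dict.insert st.2 neigh (some curr))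
          else st) (nxt, parent)
      pvLevel dangers adj safe front st.1 st.2

-- 'while frontier:' over whole waves
def pvLevels (dangers : PySem.Dict String Bool) (adj : PySem.Dict String (List String))
    (safe : PySem.Set String) :
    Nat → List String → PySem.Dict String (Option String) → Option (List String)
  | 0, _, _ => none
  | _ + 1, [], _ => none
  | fuel + 1, curr :: front, parent =>
    match pvLevel dangers adj safe (curr :: front) [] parent with
    | Sum.inl path => some path
    | Sum.inr (nxt, parent') => pvLevels dangers adj safe fuel nxt parent'

def find_escape_path_alt (start : String) (dangers : List (String × Bool)) (adj : List (String × List String)) (safe_targets : List String) : Option (List String) :=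
  if safe_targets.isEmpty then none
  else
    pvLevels (PySem.Dict.ofList dangers) (PySem.Dict.ofList adj)
      (PySem.Set.ofList safe_targets) (pvFuelB adj) [start]
      (PySem.Dict.ofList [(start, none)])

-- ===== PRECONDITION & SPEC =====
def Spec_find_escape_path (start : String) (dangers : List (String × Bool)) (adj : List (String × List String)) (safe_targets : List String) (out : Option (List String)) : Prop := out = find_escape_path_alt start dangers adj safe_targets
instance (start : String) (dangers : List (String × Bool)) (adj : List (String × List String)) (safe_targets : List String) (out : Option (List String)) : Decidable (Spec_find_escape_path start dangers adj safe_targets out) := by unfold Spec_find_escape_path; infer_instance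

-- ===== CLAIM (what is proved, stated in full; the proofs are below) =====
def Claim_equal_find_escape_path : Prop := ∀ (start : String) (dangers : List (String × Bool)) (adj : List (String × List String)) (safe_targets : List String), Dom_find_escape_path start dangers adj safe_targets → Spec_find_escape_path start dangers adj safe_targets (find_escape_path start dangers adj safe_targets)

-- ===== LEMMAS AND PROOFS =====

-- parent-pointer chain from the root (parent value none) down to c: p is the stored path of c.
inductive PvChain (par : PySem.Dict String (Option String)) : String → List String → Prop
  | base (c : String) (h : par.get? c = some none) : PvChain par c [c]
  | step (c d : String) (p : List String) (h : par.get? c = some (some d))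
      (hp : PvChain par d p) : PvChain par c (p ++ [c])

theorem pvChain_unique {par : PySem.Dict String (Option String)} {c : String} {p q : List String}
    (h : PvChain par c p) : PvChain par c q → p = q := by
  induction h generalizing q with
  | base c hc =>
    intro hq
    cases hq with
    | base => rfl
    | step _ d p hd _ => rw [hc] at hd; cases hd
  | step c d p hc hp ih =>
    intro hq
    cases hq with
    | base _ h => rw [hc] at h; cases h
    | step _ d' p' hd' hp' =>
      rw [hc] at hd'
      cases hd'
      rw [ih hp']

theorem pvChain_mem {par : PySem.Dict String (Option String)} {c x : String} {p : List String}
    (h : PvChain par c p) (hx : x ∈ p) : ∃ q, PvChain par x q ∧ q.length ≤ p.length := by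
  induction h with
  | base c hc =>
    simp at hx
    subst hx
    exact ⟨_, PvChain.base _ hc, le_rfl⟩
  | step c d p hc hp ih =>
    rcases List.mem_append.mp hx with hx | hx
    · obtain ⟨q, hq, hlen⟩ := ih hx
      exact ⟨q, hq, by simp; omega⟩
    · simp at hx
      subst hx
      exact ⟨_, PvChain.step _ d p hc hp, le_rfl⟩

theorem pvChain_nodup {par : PySem.Dict String (Option String)} {c : String} {p : List String}
    (h : PvChain par c p) : p.Nodup := by
  induction h with
  | base c hc => simp
  | step c d p hc hp ih =>
    have hcp : c ∉ p := by
      intro ha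
      obtain ⟨q, hq, hlen⟩ := pvChain_mem hp ha
      have he := pvChain_unique hq (PvChain.step c d p hc hp)
      subst he
      simp at hlen
    simp [List.nodup_append, ih]
    exact fun a ha he => hcp (he ▸ ha)

theorem pvChain_keys {par : PySem.Dict String (Option String)} {c x : String} {p : List String}
    (h : PvChain par c p) (hx : x ∈ p) : (par.get? x).isSome = true := by
  obtain ⟨q, hq, -⟩ := pvChain_mem h hx
  cases hq with
  | base _ h => simp [h]
  | step _ d r h _ => simp [h]

theorem pvChain_length {par : PySem.Dict String (Option String)} {c : String} {p : List String}
    (h : PvChain par c p) (_hnd : par.keys.Nodup) : p.length ≤ PySem.Dict.size par := by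
  have hsub : p ⊆ par.keys := by
    intro x hx
    have := pvChain_keys h hx
    rcases hx' : par.get? x with _ | v
    · rw [hx'] at this; simp at this
    · exact PySem.Dict.mem_keys_of_mem_items _ (PySem.Dict.mem_items_of_get?_eq_some _ hx')
  have : p.length ≤ par.keys.length := ((pvChain_nodup h).subperm hsub).length_le
  have hk : par.keys.length = PySem.Dict.size par := by
    simp [PySem.Dict.keys, PySem.Dict.size]
  omega

theorem pvChain_insert_fresh {par : PySem.Dict String (Option String)} {c : String}
    {p : List String} (h : PvChain par c p) {n : String} (hn : par.get? n = none)
    (v : Option String) : PvChain (par.insert n v) c p := by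
  induction h with
  | base c hc =>
    apply PvChain.base
    rw [PySem.Dict.get?_insert]
    have : c ≠ n := fun he => by rw [he, hn] at hc; cases hc
    simp [this, hc]
  | step c d p hc hp ih =>
    apply PvChain.step (hp := ih)
    rw [PySem.Dict.get?_insert]
    have : c ≠ n := fun he => by rw [he, hn] at hc; cases hc
    simp [this, hc]

theorem pvWalk_eq {par : PySem.Dict String (Option String)} {c : String} {p : List String}
    (h : PvChain par c p) : ∀ (fuel : Nat) (acc : List String), p.length ≤ fuel →
    pvWalk par fuel (some c) acc = acc ++ p.reverse := by
  induction h with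
  | base c hc =>
    intro fuel acc hlen
    cases fuel with
    | zero => simp at hlen
    | succ f => simp [pvWalk, hc, Option.join]
  | step c d p hc hp ih =>
    intro fuel acc hlen
    cases fuel with
    | zero => simp at hlen
    | succ f =>
      have : p.length ≤ f := by simp at hlen; omega
      simp [pvWalk, hc, Option.join, ih f _ this]

-- correspondence between A's queue (which may hold visited or duplicated entries) and B's
-- pending-node list F: the keys of the first unvisited occurrences, in order, are F, and
-- each such entry's stored path is the parent chain of its key.
def PvCorr (vis : PySem.Set String) (par : PySem.Dict String (Option String)) :
    List String → List (String × List String) → List String → Prop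
  | _, [], F => F = []
  | seen, (c, p) :: rest, F =>
    if PySem.Set.contains vis c || seen.contains c then
      PvCorr vis par seen rest F
    else
      match F with
      | [] => False
      | c' :: F' => c' = c ∧ PvChain par c p ∧ PvCorr vis par (c :: seen) rest F'

theorem pvCorr_congr {vis vis' : PySem.Set String} {par : PySem.Dict String (Option String)} :
    ∀ {q : List (String × List String)} {seen seen' F : List String},
    PvCorr vis par seen q F →
    (∀ x, (PySem.Set.contains vis x || seen.contains x) =
          (PySem.Set.contains vis' x || seen'.contains x)) →
    PvCorr vis' par seen' q F := by
  intro q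
  induction q with
  | nil => intro _ _ _ h _; exact h
  | cons e rest ih =>
    intro seen seen' F h hc
    obtain ⟨c, p⟩ := e
    simp only [PvCorr] at h ⊢
    rw [← hc c]
    rcases hb : (PySem.Set.contains vis c || seen.contains c) with _ | _
    · rw [hb] at h
      simp only [Bool.false_eq_true, if_false] at h ⊢
      cases F with
      | nil => exact h
      | cons c' F' =>
        obtain ⟨h1, h2, h3⟩ := h
        refine ⟨h1, h2, ih h3 ?_⟩
        intro x
        have := hc x
        simp only [List.contains_cons] at *
        rcases hx : x == c with _ | _ <;> simp_all
    · rw [hb] at h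
      simp only [if_true] at h ⊢
      exact ih h hc

theorem pvCorr_insert_fresh {vis : PySem.Set String} {par : PySem.Dict String (Option String)}
    {n : String} (hn : par.get? n = none) (v : Option String) :
    ∀ {q : List (String × List String)} {seen F : List String},
    PvCorr vis par seen q F → PvCorr vis (par.insert n v) seen q F := by
  intro q
  induction q with
  | nil => intro _ _ h; exact h
  | cons e rest ih =>
    intro seen F h
    obtain ⟨c, p⟩ := e
    simp only [PvCorr] at h ⊢
    rcases hb : (PySem.Set.contains vis c || seen.contains c) with _ | _ <;> rw [hb] at h
    · simp only [Bool.false_eq_true, if_false] at h ⊢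
      cases F with
      | nil => exact h
      | cons c' F' =>
        obtain ⟨h1, h2, h3⟩ := h
        exact ⟨h1, pvChain_insert_fresh h2 hn v, ih h3⟩
    · simpa using ih h

theorem pvCorr_append_shadow {vis : PySem.Set String} {par : PySem.Dict String (Option String)}
    {n : String} {pn : List String} :
    ∀ {q : List (String × List String)} {seen F : List String},
    PvCorr vis par seen q F →
    (PySem.Set.contains vis n = true ∨ n ∈ seen ∨ n ∈ F) →
    PvCorr vis par seen (q ++ [(n, pn)]) F := by
  intro q
  induction q with
  | nil =>
    intro seen F h hn
    subst h
    have hcond : (PySem.Set.contains vis n || seen.contains n) = true := by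
      simp only [Bool.or_eq_true, List.contains_iff_mem]
      rcases hn with h | h | h
      · exact Or.inl h
      · exact Or.inr h
      · simp at h
    simp only [List.nil_append, PvCorr, hcond, if_true]
  | cons e rest ih =>
    intro seen F h hn
    obtain ⟨c, p⟩ := e
    simp only [List.cons_append, PvCorr] at h ⊢
    rcases hb : (PySem.Set.contains vis c || seen.contains c) with _ | _ <;> rw [hb] at h
    · simp only [Bool.false_eq_true, if_false] at h ⊢
      cases F with
      | nil => exact h
      | cons c' F' =>
        obtain ⟨h1, h2, h3⟩ := h
        refine ⟨h1, h2, ih h3 ?_⟩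
        subst h1
        rcases hn with h | h | h
        · exact Or.inl h
        · exact Or.inr (Or.inl (List.mem_cons_of_mem _ h))
        · rcases List.mem_cons.mp h with h | h
          · exact Or.inr (Or.inl (by simp [h]))
          · exact Or.inr (Or.inr h)
    · simp only [if_true] at h ⊢
      exact ih h hn

theorem pvCorr_append_new {vis : PySem.Set String} {par : PySem.Dict String (Option String)}
    {n : String} {pn : List String} (hchain : PvChain par n pn) :
    ∀ {q : List (String × List String)} {seen F : List String},
    PvCorr vis par seen q F →
    PySem.Set.contains vis n = false → n ∉ seen → n ∉ F →
    PvCorr vis par seen (q ++ [(n, pn)]) (F ++ [n]) := by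
  intro q
  induction q with
  | nil =>
    intro seen F h hv hs hF
    subst h
    have hcond : (PySem.Set.contains vis n || seen.contains n) = false := by
      rw [hv, Bool.false_or]
      rcases hb : seen.contains n with _ | _
      · rfl
      · exact absurd (List.contains_iff_mem.mp hb) hs
    simp only [List.nil_append, PvCorr, hcond, Bool.false_eq_true, if_false]
    exact ⟨by trivial, hchain, by trivial⟩
  | cons e rest ih =>
    intro seen F h hv hs hF
    obtain ⟨c, p⟩ := e
    simp only [List.cons_append, PvCorr] at h ⊢
    rcases hb : (PySem.Set.contains vis c || seen.contains c) with _ | _ <;> rw [hb] at h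
    · simp only [Bool.false_eq_true, if_false] at h ⊢
      cases F with
      | nil => exact h.elim
      | cons c' F' =>
        obtain ⟨h1, h2, h3⟩ := h
        have hnc : n ≠ c' := fun he => hF (by simp [he])
        refine ⟨h1, h2, ih h3 hv ?_ ?_⟩
        · intro hmem
          rcases List.mem_cons.mp hmem with hm | hm
          · exact hnc (hm.trans h1.symm)
          · exact hs hm
        · exact fun hmem => hF (List.mem_cons_of_mem _ hmem)
    · simp only [if_true] at h ⊢
      exact ih h hv hs hF

-- unvisited adjacency mass: the fuel potential
def pvW (vis : PySem.Set String) (l : List (String × List String)) : Nat :=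
  (l.map (fun kv => if PySem.Set.contains vis kv.1 then 0 else kv.2.length)).sum

theorem pv_set_contains_add (vis : PySem.Set String) (c x : String) :
    PySem.Set.contains (PySem.Set.add vis c) x =
      (x == c || PySem.Set.contains vis x) := by
  have h1 := PySem.Set.contains_iff (PySem.Set.add vis c) x
  have h2 := PySem.Set.contains_iff vis x
  have h3 := PySem.Set.mem_add vis c x
  rcases hb : PySem.Set.contains (PySem.Set.add vis c) x with _ | _ <;>
    rcases hv : PySem.Set.contains vis x with _ | _ <;>
    rcases hc : x == c with _ | _ <;> simp_all

theorem pv_safe_contains (safe_targets : List String) (c : String) :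
    PySem.Set.contains (PySem.Set.ofList safe_targets) c = safe_targets.contains c := by
  have h1 := PySem.Set.contains_iff (PySem.Set.ofList safe_targets) c
  have h2 := PySem.Set.mem_ofList safe_targets c
  rcases hb : PySem.Set.contains (PySem.Set.ofList safe_targets) c with _ | _ <;>
    rcases hl : safe_targets.contains c with _ | _ <;>
    simp_all [List.contains_iff_mem]

theorem pvW_mono (c : String) : ∀ (l : List (String × List String)) (vis : PySem.Set String),
    pvW (PySem.Set.add vis c) l ≤ pvW vis l := by
  intro l vis
  induction l with
  | nil => simp [pvW]
  | cons kv rest ih =>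
    simp only [pvW, List.map_cons, List.sum_cons] at ih ⊢
    have : (if PySem.Set.contains (PySem.Set.add vis c) kv.1 then 0 else kv.2.length) ≤
        (if PySem.Set.contains vis kv.1 then 0 else kv.2.length) := by
      rw [pv_set_contains_add]
      rcases hv : PySem.Set.contains vis kv.1 with _ | _ <;>
        rcases hc : kv.1 == c with _ | _ <;> simp [hv, hc]
    omega

theorem pvW_empty (l : List (String × List String)) :
    pvW PySem.Set.empty l = (l.map (fun kv => kv.2.length)).sum := by
  induction l with
  | nil => rfl
  | cons kv rest ih =>
    simp only [pvW, List.map_cons, List.sum_cons] at ih ⊢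
    have : PySem.Set.contains PySem.Set.empty kv.1 = false := by
      rcases hb : PySem.Set.contains PySem.Set.empty kv.1 with _ | _
      · rfl
      · have := (PySem.Set.contains_iff _ _).mp hb
        simp [PySem.Set.empty] at this
    rw [this]
    simp [ih]

theorem pvDict_ofList_append (l : List (String × List String)) (kv : String × List String) :
    PySem.Dict.ofList (l ++ [kv]) = (PySem.Dict.ofList l).insert kv.1 kv.2 := by
  show (l ++ [kv]).foldl (fun d p => d.insert p.1 p.2) PySem.Dict.empty = _
  rw [List.foldl_append]
  rfl

theorem pvW_add_le (c : String) :
    ∀ (l : List (String × List String)) (vis : PySem.Set String),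
    PySem.Set.contains vis c = false →
    pvW (PySem.Set.add vis c) l + ((PySem.Dict.ofList l).getD c []).length ≤ pvW vis l := by
  intro l
  induction l using List.reverseRecOn with
  | nil => intro vis _; simp [pvW]; rfl
  | append_singleton rest kv ih =>
    intro vis hv
    have hW : ∀ v, pvW v (rest ++ [kv]) =
        pvW v rest + (if PySem.Set.contains v kv.1 then 0 else kv.2.length) := by
      intro v; simp [pvW]
    rw [pvDict_ofList_append, hW, hW, PySem.Dict.getD_insert]
    by_cases hck : c = kv.1
    · subst hck
      have h1 : PySem.Set.contains (PySem.Set.add vis kv.1) kv.1 = true := by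
        rw [pv_set_contains_add]; simp
      simp only [h1, hv, Bool.false_eq_true, if_true, if_false, if_pos rfl]
      have := pvW_mono kv.1 rest vis
      omega
    · have hbeq : (kv.1 == c) = false := by
        rcases hb : kv.1 == c with _ | _
        · rfl
        · exact absurd ((beq_iff_eq).mp hb).symm hck
      have h2 : PySem.Set.contains (PySem.Set.add vis c) kv.1 =
          PySem.Set.contains vis kv.1 := by
        rw [pv_set_contains_add, hbeq, Bool.false_or]
      rw [h2, if_neg (fun he => hck he)]
      have := ih vis hv
      split_ifs <;> omega

-- the neighbour fold of one expansion, in lockstep on both sides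
theorem pvFold_eq (dangers : PySem.Dict String Bool) (vis' : PySem.Set String) (c : String)
    {p : List String} :
    ∀ (ns : List String) (qA : List (String × List String)) (fs nxt : List String)
      (par : PySem.Dict String (Option String)),
    par.keys.Nodup →
    (∀ k, PySem.Dict.contains par k = true ↔
      (PySem.Set.contains vis' k = true ∨ k ∈ fs ++ nxt)) →
    PvCorr vis' par [] qA (fs ++ nxt) →
    PvChain par c p →
    (let stB := ns.foldl
        (fun (st : List String × PySem.Dict String (Option String)) neigh =>
          if !PySem.Dict.contains st.2 neigh && !PySem.Dict.getD dangers neigh true then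
            (st.1 ++ [neigh], PySem.Dict.insert st.2 neigh (some c))
          else st) (nxt, par)
     let qA' := ns.foldl
        (fun q neigh =>
          if !PySem.Set.contains vis' neigh && !PySem.Dict.getD dangers neigh true then
            q ++ [(neigh, p ++ [neigh])]
          else q) qA
     stB.2.keys.Nodup ∧
     (∀ k, PySem.Dict.contains stB.2 k = true ↔
       (PySem.Set.contains vis' k = true ∨ k ∈ fs ++ stB.1)) ∧
     PvCorr vis' stB.2 [] qA' (fs ++ stB.1) ∧
     qA'.length ≤ qA.length + ns.length ∧
     stB.1.length ≤ nxt.length + ns.length) := by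
  intro ns
  induction ns with
  | nil =>
    intro qA fs nxt par h1 h2 h3 _
    exact ⟨h1, h2, h3, by simp, by simp⟩
  | cons n ns ih =>
    intro qA fs nxt par h1 h2 h3 hchain
    simp only [List.foldl_cons]
    rcases hd : PySem.Dict.getD dangers n true with _ | _
    · -- not dangerous
      rcases hvn : PySem.Set.contains vis' n with _ | _
      · -- n unvisited: A appends
        rcases hcn : PySem.Dict.contains par n with _ | _
        · -- fresh for B too: B inserts, the two new entries correspond
          simp only [Bool.not_false, Bool.not_true, Bool.false_and, Bool.and_false, Bool.and_self, reduceIte, Bool.false_eq_true, if_false]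
          have hget : par.get? n = none := by
            have := PySem.Dict.contains_eq_isSome_get? (d := par) (k := n)
            rw [hcn] at this
            rcases hg : par.get? n with _ | w
            · rfl
            · rw [hg] at this; simp at this
          have hninF : n ∉ fs ++ nxt := by
            intro hmem
            have := (h2 n).mpr (Or.inr hmem)
            rw [hcn] at this; cases this
          have hchain' : PvChain (par.insert n (some c)) c p :=
            pvChain_insert_fresh hchain hget _
          have hchn : PvChain (par.insert n (some c)) n (p ++ [n]) :=
            PvChain.step n c p (by rw [PySem.Dict.get?_insert]; simp) hchain'
          have hcorr' : PvCorr vis' (par.insert n (some c)) []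
              (qA ++ [(n, p ++ [n])]) ((fs ++ nxt) ++ [n]) :=
            pvCorr_append_new hchn (pvCorr_insert_fresh hget _ h3) hvn (by simp) hninF
          have hres := ih (qA ++ [(n, p ++ [n])]) fs (nxt ++ [n]) (par.insert n (some c))
            (PySem.Dict.nodup_keys_insert _ _ _ h1)
            (by
              intro k
              rw [PySem.Dict.contains_insert]
              constructor
              · intro hk
                rcases hor : (k == n) with _ | _
                · rw [hor] at hk
                  simp only [Bool.false_or] at hk
                  rcases (h2 k).mp hk with h | h
                  · exact Or.inl h
                  · right; simp at h ⊢; tauto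
                · right
                  have : k = n := by simpa using hor
                  simp [this]
              · intro hk
                rcases hk with h | h
                · rw [(h2 k).mpr (Or.inl h)]; simp
                · simp at h
                  rcases h with h | h | h
                  · rw [(h2 k).mpr (Or.inr (by simp [h]))]; simp
                  · rw [(h2 k).mpr (Or.inr (by simp [h]))]; simp
                  · simp [h])
            (by rw [← List.append_assoc]; exact hcorr')
            hchain'
          refine ⟨hres.1, hres.2.1, hres.2.2.1, ?_, ?_⟩
          · have h4 := hres.2.2.2.1
            have ha : (qA ++ [(n, p ++ [n])]).length = qA.length + 1 := by simp
            simp only [List.length_cons]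
            omega
          · have h5 := hres.2.2.2.2
            have hb : (nxt ++ [n]).length = nxt.length + 1 := by simp
            simp only [List.length_cons]
            omega
        · -- already a key of parent: A appends a shadowed duplicate, B skips
          simp only [Bool.not_false, Bool.not_true, Bool.false_and, Bool.and_false, Bool.and_self, reduceIte, Bool.false_eq_true, if_false]
          have hcorr' : PvCorr vis' par [] (qA ++ [(n, p ++ [n])]) (fs ++ nxt) := by
            apply pvCorr_append_shadow h3
            rcases (h2 n).mp hcn with h | h
            · exact Or.inl h
            · exact Or.inr (Or.inr h)
          have hres := ih (qA ++ [(n, p ++ [n])]) fs nxt par h1 h2 hcorr' hchain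
          refine ⟨hres.1, hres.2.1, hres.2.2.1, ?_, ?_⟩
          · have h4 := hres.2.2.2.1
            have ha : (qA ++ [(n, p ++ [n])]).length = qA.length + 1 := by simp
            simp only [List.length_cons]
            omega
          · have h5 := hres.2.2.2.2
            simp only [List.length_cons]
            omega
      · -- n visited: both skip (for B, n is a key of parent by the key invariant)
        have hcn : PySem.Dict.contains par n = true := (h2 n).mpr (Or.inl hvn)
        simp only [hcn, Bool.not_false, Bool.not_true, Bool.false_and, Bool.and_false, Bool.and_self, reduceIte, Bool.false_eq_true, if_false]
        have hres := ih qA fs nxt par h1 h2 h3 hchain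
        refine ⟨hres.1, hres.2.1, hres.2.2.1, ?_, ?_⟩
        · have h4 := hres.2.2.2.1
          simp only [List.length_cons]
          omega
        · have h5 := hres.2.2.2.2
          simp only [List.length_cons]
          omega
    · -- dangerous: both skip
      simp only [Bool.not_false, Bool.not_true, Bool.false_and, Bool.and_false, Bool.and_self, reduceIte, Bool.false_eq_true, if_false]
      have hres := ih qA fs nxt par h1 h2 h3 hchain
      refine ⟨hres.1, hres.2.1, hres.2.2.1, ?_, ?_⟩
      · have h4 := hres.2.2.2.1
        simp only [List.length_cons]
        omega
      · have h5 := hres.2.2.2.2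
        simp only [List.length_cons]
        omega

theorem pvLevels_nil (dangers : PySem.Dict String Bool) (adj : PySem.Dict String (List String))
    (safe : PySem.Set String) (fuel : Nat) (par : PySem.Dict String (Option String)) :
    pvLevels dangers adj safe fuel [] par = none := by
  cases fuel <;> rfl

-- one active expansion step: A pops the head of the current wave
theorem pvExpand (dangersD : PySem.Dict String Bool) (adjL : List (String × List String))
    (safe_targets : List String) (fuelA : Nat)
    (ih : ∀ (qA : List (String × List String)) (vis : PySem.Set String)
      (fs nxt : List String) (par : PySem.Dict String (Option String)) (fuelB : Nat),
      par.keys.Nodup →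
      (∀ k, PySem.Dict.contains par k = true ↔
        (PySem.Set.contains vis k = true ∨ k ∈ fs ++ nxt)) →
      PvCorr vis par [] qA (fs ++ nxt) →
      qA.length + pvW vis adjL ≤ fuelA →
      1 + nxt.length + pvW vis adjL ≤ fuelB →
      pvLoopA dangersD (PySem.Dict.ofList adjL) safe_targets fuelA qA vis =
        (match pvLevel dangersD (PySem.Dict.ofList adjL) (PySem.Set.ofList safe_targets)
            fs nxt par with
         | Sum.inl path => some path
         | Sum.inr (n, pr) => pvLevels dangersD (PySem.Dict.ofList adjL)
            (PySem.Set.ofList safe_targets) fuelB n pr))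
    (c : String) (p : List String) (rest : List (String × List String))
    (vis : PySem.Set String) (fs' nxt : List String)
    (par : PySem.Dict String (Option String)) (fuelB : Nat)
    (h1 : par.keys.Nodup)
    (h2 : ∀ k, PySem.Dict.contains par k = true ↔
      (PySem.Set.contains vis k = true ∨ k ∈ (c :: fs') ++ nxt))
    (hchain : PvChain par c p)
    (hcorr : PvCorr vis par [c] rest (fs' ++ nxt))
    (hvc : PySem.Set.contains vis c = false)
    (h4 : rest.length + 1 + pvW vis adjL ≤ fuelA + 1)
    (h5 : 1 + nxt.length + pvW vis adjL ≤ fuelB) :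
    pvLoopA dangersD (PySem.Dict.ofList adjL) safe_targets (fuelA + 1) ((c, p) :: rest) vis =
      (match pvLevel dangersD (PySem.Dict.ofList adjL) (PySem.Set.ofList safe_targets)
          (c :: fs') nxt par with
       | Sum.inl path => some path
       | Sum.inr (n, pr) => pvLevels dangersD (PySem.Dict.ofList adjL)
          (PySem.Set.ofList safe_targets) fuelB n pr) := by
  rw [pvLoopA, if_neg (by rw [hvc]; simp)]
  rw [pvLevel]
  have hsB : PySem.Set.contains (PySem.Set.ofList safe_targets) c = safe_targets.contains c :=
    pv_safe_contains _ _
  rcases hsafe : safe_targets.contains c with _ | _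
  · -- not a safe target: expand c on both sides
    simp only [Bool.false_eq_true, if_false]
    rw [if_neg (by rw [hsB, hsafe]; simp)]
    have hvc' : PySem.Set.contains (PySem.Set.add vis c) c = true := by
      rw [pv_set_contains_add]; simp
    have h2' : ∀ k, PySem.Dict.contains par k = true ↔
        (PySem.Set.contains (PySem.Set.add vis c) k = true ∨ k ∈ fs' ++ nxt) := by
      intro k
      rw [h2 k, pv_set_contains_add]
      rcases hk : k == c with _ | _
      · have : ¬ (k = c) := by simpa using hk
        simp [this]
      · have : k = c := by simpa using hk
        simp [this]
    have hcorr' : PvCorr (PySem.Set.add vis c) par [] rest (fs' ++ nxt) := by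
      apply pvCorr_congr hcorr
      intro x
      rw [pv_set_contains_add]
      rcases hx : x == c with _ | _
      · have hne : ¬ x = c := by simpa using hx
        simp only [hx, Bool.false_or]
        simp [hne]
      · have hxc : x = c := by simpa using hx
        subst hxc
        simp
    have hfold := pvFold_eq dangersD (PySem.Set.add vis c) c
      ((PySem.Dict.ofList adjL).getD c []) rest fs' nxt par h1 h2' hcorr' hchain
    have hWle := pvW_add_le c adjL vis hvc
    refine ih _ _ _ _ _ _ hfold.1 hfold.2.1 hfold.2.2.1 ?_ ?_
    · have := hfold.2.2.2.1
      omega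
    · have := hfold.2.2.2.2
      omega
  · -- safe target found: A returns the stored path, B rebuilds it from the parent chain
    rw [if_pos (show (true : Bool) = true from rfl)]
    rw [if_pos (by rw [hsB, hsafe] : PySem.Set.contains (PySem.Set.ofList safe_targets) c = true)]
    rw [pvWalk_eq hchain (PySem.Dict.size par) [] (pvChain_length hchain h1)]
    simp

-- the main simulation: A's one-pop-at-a-time loop against B's wave loop
theorem pvMain (dangersD : PySem.Dict String Bool) (adjL : List (String × List String))
    (safe_targets : List String) :
    ∀ (fuelA : Nat) (qA : List (String × List String)) (vis : PySem.Set String)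
      (fs nxt : List String) (par : PySem.Dict String (Option String)) (fuelB : Nat),
    par.keys.Nodup →
    (∀ k, PySem.Dict.contains par k = true ↔
      (PySem.Set.contains vis k = true ∨ k ∈ fs ++ nxt)) →
    PvCorr vis par [] qA (fs ++ nxt) →
    qA.length + pvW vis adjL ≤ fuelA →
    1 + nxt.length + pvW vis adjL ≤ fuelB →
    pvLoopA dangersD (PySem.Dict.ofList adjL) safe_targets fuelA qA vis =
      (match pvLevel dangersD (PySem.Dict.ofList adjL) (PySem.Set.ofList safe_targets)
          fs nxt par with
       | Sum.inl path => some path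
       | Sum.inr (n, pr) => pvLevels dangersD (PySem.Dict.ofList adjL)
          (PySem.Set.ofList safe_targets) fuelB n pr) := by
  intro fuelA
  induction fuelA with
  | zero =>
    intro qA vis fs nxt par fuelB h1 h2 h3 h4 h5
    have hq : qA = [] := by
      cases qA with
      | nil => rfl
      | cons e rest => simp [List.length_cons] at h4
    subst hq
    have hF : fs ++ nxt = [] := h3
    rcases List.append_eq_nil_iff.mp hF with ⟨hfs, hnxt⟩
    subst hfs; subst hnxt
    rw [pvLoopA, pvLevel]
    simp [pvLevels_nil]
  | succ fuelA ih =>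
    intro qA vis fs nxt par fuelB h1 h2 h3 h4 h5
    cases qA with
    | nil =>
      have hF : fs ++ nxt = [] := h3
      rcases List.append_eq_nil_iff.mp hF with ⟨hfs, hnxt⟩
      subst hfs; subst hnxt
      rw [pvLoopA, pvLevel]
      simp [pvLevels_nil]
    | cons e rest =>
      obtain ⟨c, p⟩ := e
      rcases hvc : PySem.Set.contains vis c with _ | _
      · -- c not yet visited: it heads the current wave
        have h3' := h3
        simp only [PvCorr] at h3'
        rw [if_neg (by rw [hvc]; simp)] at h3'
        cases fs with
        | cons f fs' =>
          simp only [List.cons_append] at h3'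
          obtain ⟨hfc, hchain, hcorr⟩ := h3'
          subst hfc
          exact pvExpand dangersD adjL safe_targets fuelA ih f p rest vis fs' nxt par fuelB
            h1 h2 hchain hcorr hvc (by simpa using h4) h5
        | nil =>
          simp only [List.nil_append] at h3' h2
          cases nxt with
          | nil => exact h3'.elim
          | cons n2 nxt2 =>
            obtain ⟨hfc, hchain, hcorr⟩ := h3'
            subst hfc
            -- B finishes the empty wave and starts the next one
            rw [pvLevel]
            obtain ⟨fb, rfl⟩ : ∃ fb, fuelB = fb + 1 := by
              rcases fuelB with _ | fb
              · simp at h5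
              · exact ⟨fb, rfl⟩
            show _ = pvLevels dangersD (PySem.Dict.ofList adjL)
              (PySem.Set.ofList safe_targets) (fb + 1) (n2 :: nxt2) par
            rw [pvLevels]
            have h2n : ∀ k, PySem.Dict.contains par k = true ↔
                (PySem.Set.contains vis k = true ∨ k ∈ (n2 :: nxt2) ++ []) := by
              intro k; rw [h2 k]; simp
            exact pvExpand dangersD adjL safe_targets fuelA ih n2 p rest vis nxt2 [] par fb
              h1 h2n hchain (by simpa using hcorr) hvc (by simpa using h4)
              (by simp only [List.length_cons] at h5 ⊢; simp; omega)
      · -- c already visited: A skips the stale entry, B's state is unchanged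
        rw [pvLoopA, if_pos (by rw [hvc])]
        have h3' := h3
        simp only [PvCorr] at h3'
        rw [if_pos (by rw [hvc]; simp)] at h3'
        exact ih rest vis fs nxt par fuelB h1 h2 h3' (by simp at h4; omega) h5

-- ===== VERDICT (by name: the statement is the Claim_ definition above) =====
theorem find_escape_path_spec : Claim_equal_find_escape_path := by
  intro start dangers adj safe_targets _
  unfold Spec_find_escape_path find_escape_path find_escape_path_alt
  rcases h : safe_targets.isEmpty with _ | _
  · simp only [Bool.false_eq_true, if_false]
    have hfb : pvFuelB adj = pvFuel adj + 1 := by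
      simp only [pvFuel, pvFuelB]; omega
    rw [hfb, pvLevels]
    apply pvMain
    · show (PySem.Dict.empty.insert start none).keys.Nodup
      exact PySem.Dict.nodup_keys_insert _ _ _ PySem.Dict.nodup_keys_empty
    · intro k
      show (PySem.Dict.empty.insert start none).contains k = true ↔ _
      rw [PySem.Dict.contains_insert, PySem.Dict.contains_empty]
      constructor
      · intro hk
        right
        have : k = start := by simpa using hk
        simp [this]
      · intro hk
        rcases hk with hk | hk
        · rw [PySem.Set.contains_iff] at hk
          simp [PySem.Set.empty] at hk
        · simp at hk
          simp [hk]
    · show PvCorr PySem.Set.empty (PySem.Dict.empty.insert start none) []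
        [(start, [start])] ([start] ++ [])
      simp only [List.append_nil, PvCorr]
      rw [if_neg (by simp [PySem.Set.empty])]
      exact ⟨by trivial, PvChain.base start (PySem.Dict.get?_insert_self _ _ _), by trivial⟩
    · rw [pvW_empty]
      simp [pvFuel]
    · rw [pvW_empty]
      simp [pvFuel]
  · simp
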